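-- pv_equiv track=rewrite | github.com/Gouthamts0077/wordlist_generator | wordlist_generator.py | generate_wordlist
-- ===== SOURCE A (Python) =====
-- import itertools
--
-- LEET_MAPPING = {
--     'a': ['@', '4'],
--     'b': ['8'],
--     'e': ['3'],
--     'g': ['6', '9'],
--     'i': ['1', '!'],
--     'l': ['1', '|'],
--     'o': ['0'],
--     's': ['5', '$'],
--     't': ['7'],
--     'z': ['2']
-- }
--
-- COMMON_SUFFIXES = ['123', '!', '@', '#', '1', '2023', '2024']
--
-- COMMON_PREFIXES = ['!', '@', '#', '1', '2023', '2024']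
--
-- def generate_leet_variations(word):
--     """
--     Generate all possible leet speak variations of a word.
--     """
--     if not word:
--         return [word]
--
--     variations = ['']
--     for char in word:
--         new_variations = []
--         for variation in variations:
--             # Add the original character
--             new_variations.append(variation + char)
--             # Add leet replacements if available
--             if char.lower() in LEET_MAPPING:
--                 for leet_char in LEET_MAPPING[char.lower()]:
--                     new_variations.append(variation + leet_char)
--         variations = new_variations
--     return variations
--
-- def generate_wordlist(details):
--     """
--     Generate a wordlist based on input details with variations.
--     """
--     wordlist = set()
--
--     # Generate basic permutations of details
--     for r in range(1, len(details) + 1):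
--         for combo in itertools.permutations(details, r):
--             base_word = ''.join(combo)
--             wordlist.add(base_word)
--             # Generate leet variations for each permutation
--             for leet_word in generate_leet_variations(base_word):
--                 wordlist.add(leet_word)
--
--     # Add common prefixes and suffixes
--     enhanced_wordlist = set()
--     for word in wordlist:
--         for suffix in COMMON_SUFFIXES:
--             enhanced_wordlist.add(word + suffix)
--         for prefix in COMMON_PREFIXES:
--             enhanced_wordlist.add(prefix + word)
--         # Capitalized version
--         enhanced_wordlist.add(word.capitalize())
--
--     # Merge enhanced wordlist with original
--     wordlist.update(enhanced_wordlist)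
--
--     return wordlist
-- ===== SOURCE B (Python) =====
-- LEET_MAPPING = {
--     'a': ['@', '4'],
--     'b': ['8'],
--     'e': ['3'],
--     'g': ['6', '9'],
--     'i': ['1', '!'],
--     'l': ['1', '|'],
--     'o': ['0'],
--     's': ['5', '$'],
--     't': ['7'],
--     'z': ['2']
-- }
--
-- COMMON_SUFFIXES = ['123', '!', '@', '#', '1', '2023', '2024']
--
-- COMMON_PREFIXES = ['!', '@', '#', '1', '2023', '2024']
--
--
-- def _leet(word):
--     # all leet variants of one word, recursively (original word comes first)
--     if not word:
--         return ['']
--     ch, rest = word[0], _leet(word[1:])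
--     return [o + t for o in [ch] + LEET_MAPPING.get(ch.lower(), []) for t in rest]
--
--
-- def _arrangements(pool, r):
--     # all r-length arrangements of pool, recursively, by original position
--     if r == 0:
--         return [[]]
--     return [[pool[i]] + rest
--             for i in range(len(pool))
--             for rest in _arrangements(pool[:i] + pool[i + 1:], r - 1)]
--
--
-- def generate_wordlist(details):
--     variant_table = [_leet(d) for d in details]  # leet expansion done ONCE per detail
--     words = set()
--     for r in range(1, len(details) + 1):
--         for chosen in _arrangements(variant_table, r):
--             vs = ['']
--             for vl in chosen:
--                 vs = [a + b for a in vs for b in vl]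
--             words.update(vs)
--     enhanced = {v
--                 for w in words
--                 for v in [w + s for s in COMMON_SUFFIXES]
--                        + [p + w for p in COMMON_PREFIXES]
--                        + [w.capitalize()]}
--     return words | enhanced
-- ===== Notes on version B (the rewrite author's own statement) =====
-- stated objective: alternative
-- what changed: B memoizes the leet variant list of each detail once in a table, generates permutations with a recursive by-position arrangement function over that table, and concatenates each chosen tuple of variant lists by a fold of cross-products, so A's per-permutation join-then-character-scan leet expansion disappears; the prefix/suffix/capitalize loop becomes one set comprehension.
import Mathlib
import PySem

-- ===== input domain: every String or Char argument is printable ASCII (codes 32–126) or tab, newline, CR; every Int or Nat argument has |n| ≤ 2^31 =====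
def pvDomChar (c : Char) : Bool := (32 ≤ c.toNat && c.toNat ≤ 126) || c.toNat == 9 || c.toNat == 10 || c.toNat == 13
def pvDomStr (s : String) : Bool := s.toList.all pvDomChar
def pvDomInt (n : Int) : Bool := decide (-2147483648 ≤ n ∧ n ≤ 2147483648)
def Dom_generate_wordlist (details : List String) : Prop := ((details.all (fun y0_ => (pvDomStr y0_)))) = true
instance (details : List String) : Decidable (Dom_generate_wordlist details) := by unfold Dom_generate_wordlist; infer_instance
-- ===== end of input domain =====

-- B computes the leet variants ONCE per detail (memoized table), generates the
-- permutations by a recursive by-position arrangement function over that table, and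
-- combines each chosen tuple of variant lists by a fold of cross-products — so A's
-- per-permutation join-then-character-scan leet expansion disappears; the enhancement
-- loop becomes one set comprehension.

-- ===== PORT A =====

def LEET_MAPPING : PySem.Dict String (List String) :=
  PySem.Dict.ofList
    [("a", ["@", "4"]), ("b", ["8"]), ("e", ["3"]), ("g", ["6", "9"]),
     ("i", ["1", "!"]), ("l", ["1", "|"]), ("o", ["0"]), ("s", ["5", "$"]),
     ("t", ["7"]), ("z", ["2"])]

def COMMON_SUFFIXES : List String := ["123", "!", "@", "#", "1", "2023", "2024"]

def COMMON_PREFIXES : List String := ["!", "@", "#", "1", "2023", "2024"]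

-- hand port of Python str.capitalize (exact on ASCII: first char uppercased, rest lowercased)
def pyCapitalize (s : String) : String :=
  match s.toList with
  | [] => s
  | c :: rest => String.ofList (PySem.Chars.upperChar c :: PySem.Chars.lower rest)

def generate_leet_variations (word : String) : List String :=
  if word.toList = [] then [word]
  else
    word.toList.foldl
      (fun variations c =>
        variations.foldl
          (fun nv v =>
            let nv1 := nv ++ [v ++ String.ofList [c]]
            -- 'if char.lower() in LEET_MAPPING: for leet_char in LEET_MAPPING[char.lower()]'
            match PySem.Dict.get? LEET_MAPPING (PySem.Str.lower (String.ofList [c])) with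
            | some leets => leets.foldl (fun nv2 lc => nv2 ++ [v ++ lc]) nv1
            | none => nv1)
          [])
      [""]

def generate_wordlist (details : List String) : List String :=
  let wordlist : PySem.Set String :=
    (PySem.List.pyRange 1 ((details.length : Int) + 1) 1).foldl
      (fun wl r =>
        (PySem.List.permutations details r.toNat).foldl
          (fun wl combo =>
            let base := PySem.Str.join "" combo
            let wl := PySem.Set.add wl base
            (generate_leet_variations base).foldl (fun wl lw => PySem.Set.add wl lw) wl)
          wl)
      PySem.Set.empty
  let enhanced : PySem.Set String :=
    wordlist.foldl
      (fun ew w =>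
        let ew := COMMON_SUFFIXES.foldl (fun ew suf => PySem.Set.add ew (w ++ suf)) ew
        let ew := COMMON_PREFIXES.foldl (fun ew pre => PySem.Set.add ew (pre ++ w)) ew
        PySem.Set.add ew (pyCapitalize w))
      PySem.Set.empty
  PySem.Set.update wordlist enhanced

-- ===== PORT B =====

-- '[ch] + LEET_MAPPING.get(ch.lower(), [])'
def optsOf (c : Char) : List String :=
  String.ofList [c] :: PySem.Dict.getD LEET_MAPPING (PySem.Str.lower (String.ofList [c])) []

-- _leet: all leet variants of one word, recursively (original word comes first)
def leet_alt : List Char → List String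
  | [] => [""]
  | c :: cs => (optsOf c).flatMap (fun o => (leet_alt cs).map (fun t => o ++ t))

-- _arrangements: all r-length arrangements of pool, recursively, by original position
def arrangements {α : Type} (pool : List α) : Nat → List (List α)
  | 0 => [[]]
  | r + 1 =>
      (List.range pool.length).flatMap (fun i =>
        match pool[i]? with
        | none => []   -- unreachable: i < pool.length
        | some x => (arrangements (pool.eraseIdx i) r).map (fun rest => x :: rest))

def generate_wordlist_alt (details : List String) : List String :=
  let variant_table : List (List String) := details.map (fun d => leet_alt d.toList)
  let words : PySem.Set String :=
    (PySem.List.pyRange 1 ((details.length : Int) + 1) 1).foldl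
      (fun ws r =>
        (arrangements variant_table r.toNat).foldl
          (fun ws chosen =>
            PySem.Set.update ws
              (chosen.foldl (fun vs vl => vs.flatMap (fun a => vl.map (fun b => a ++ b))) [""]))
          ws)
      PySem.Set.empty
  let enhanced : PySem.Set String :=
    PySem.Set.ofList (words.flatMap (fun w =>
      COMMON_SUFFIXES.map (fun suf => w ++ suf)
      ++ COMMON_PREFIXES.map (fun pre => pre ++ w)
      ++ [pyCapitalize w]))
  PySem.Set.union words enhanced

-- ===== PRECONDITION & SPEC =====
def Spec_generate_wordlist (details : List String) (out : List String) : Prop := out = generate_wordlist_alt details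
instance (details : List String) (out : List String) : Decidable (Spec_generate_wordlist details out) := by unfold Spec_generate_wordlist; infer_instance

-- ===== CLAIM (what is proved, stated in full; the proofs are below) =====
def Claim_equal_generate_wordlist : Prop := ∀ (details : List String), Dom_generate_wordlist details → Spec_generate_wordlist details (generate_wordlist details)

-- ===== LEMMAS AND PROOFS =====

-- canonical char-level variant list (A's accumulator written as a flatMap fold)
def pvL (cs : List Char) : List String :=
  cs.foldl (fun vs c => vs.flatMap (fun v => (optsOf c).map (fun o => v ++ o))) [""]

theorem pv_flatten_singl {α β : Type} (f : α → β) (l : List α) :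
    (l.map (fun x => [f x])).flatten = l.map f := by
  induction l with
  | nil => rfl
  | cons a t ih => simp [ih]

-- ''.join on the character level: empty separator intercalate is flatten
theorem pv_intercalate_nil (l : List (List Char)) : List.intercalate [] l = l.flatten := by
  induction l with
  | nil => rfl
  | cons a t ih =>
    cases t with
    | nil => simp [List.intercalate]
    | cons b u =>
      simp only [List.intercalate, List.intersperse] at ih ⊢
      simp [ih]

theorem pv_toList_join0 (parts : List String) :
    (PySem.Str.join "" parts).toList = (parts.map String.toList).flatten := by
  simp [PySem.Str.join, PySem.Chars.join, pv_intercalate_nil]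

theorem pv_join0_nil : PySem.Str.join "" ([] : List String) = "" := by
  apply String.toList_inj.mp
  rw [pv_toList_join0]
  simp

theorem pv_join0_cons (d : String) (combo : List String) :
    PySem.Str.join "" (d :: combo) = d ++ PySem.Str.join "" combo := by
  apply String.toList_inj.mp
  rw [String.toList_append, pv_toList_join0, pv_toList_join0]
  simp

-- A's inner per-character accumulation is a flatMap over the option table
theorem pv_stepA_eq (vs : List String) (c : Char) :
    vs.foldl
      (fun nv v =>
        let nv1 := nv ++ [v ++ String.ofList [c]]
        match PySem.Dict.get? LEET_MAPPING (PySem.Str.lower (String.ofList [c])) with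
        | some leets => leets.foldl (fun nv2 lc => nv2 ++ [v ++ lc]) nv1
        | none => nv1)
      []
    = vs.flatMap (fun v => (optsOf c).map (fun o => v ++ o)) := by
  have hbody : (fun (nv : List String) (v : String) =>
        let nv1 := nv ++ [v ++ String.ofList [c]]
        match PySem.Dict.get? LEET_MAPPING (PySem.Str.lower (String.ofList [c])) with
        | some leets => leets.foldl (fun nv2 lc => nv2 ++ [v ++ lc]) nv1
        | none => nv1)
      = fun nv v => nv ++ (optsOf c).map (fun o => v ++ o) := by
    funext nv v
    cases h : PySem.Dict.get? LEET_MAPPING (PySem.Str.lower (String.ofList [c])) with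
    | none => simp [optsOf, PySem.Dict.getD, h]
    | some leets =>
      simp [optsOf, PySem.Dict.getD, h, pv_flatten_singl, List.append_assoc]
  rw [hbody]
  simpa using PySem.List.foldl_append_eq_flatMap (fun v => (optsOf c).map (fun o => v ++ o)) vs []

-- A's generator equals the canonical list (the empty-word guard is redundant: pvL [] = [""])
theorem pv_leetA_L (w : String) : generate_leet_variations w = pvL w.toList := by
  unfold generate_leet_variations
  by_cases h : w.toList = []
  · have hw : w = "" := String.toList_inj.mp (by simp [h])
    simp [hw, pvL]
  · simp only [h, ite_false]
    apply PySem.List.foldl_congr_mem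
    intro acc c _
    exact pv_stepA_eq acc c

-- running the canonical fold from any start distributes as a flatMap
theorem pv_L_shift (cs : List Char) : ∀ vs : List String,
    cs.foldl (fun vs c => vs.flatMap (fun v => (optsOf c).map (fun o => v ++ o))) vs
      = vs.flatMap (fun a => (pvL cs).map (fun t => a ++ t)) := by
  induction cs with
  | nil =>
    intro vs
    simp only [List.foldl_nil, pvL]
    simp [List.flatMap, pv_flatten_singl]
  | cons c cs ih =>
    intro vs
    simp only [List.foldl_cons]
    rw [ih]
    have hR : pvL (c :: cs) = (optsOf c).flatMap (fun o => (pvL cs).map (fun t => o ++ t)) := by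
      show cs.foldl _ (List.flatMap _ [""]) = _
      have h0 : ([""] : List String).flatMap (fun v => (optsOf c).map (fun o => v ++ o)) = optsOf c := by
        simp [String.empty_append]
      rw [h0, ih]
    rw [hR]
    simp [List.flatMap_assoc, List.flatMap_map, List.map_flatMap, List.map_map, Function.comp_def, String.append_assoc]

-- B's recursive _leet equals the canonical list
theorem pv_leetB_L (cs : List Char) : leet_alt cs = pvL cs := by
  induction cs with
  | nil => rfl
  | cons c cs ih =>
    show (optsOf c).flatMap (fun o => (leet_alt cs).map (fun t => o ++ t)) = pvL (c :: cs)
    rw [ih]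
    have h0 : ([""] : List String).flatMap (fun v => (optsOf c).map (fun o => v ++ o)) = optsOf c := by
      simp [String.empty_append]
    show _ = cs.foldl _ (List.flatMap _ [""])
    rw [h0, pv_L_shift]

-- the canonical list of a concatenation is the cross product of the parts' lists
theorem pv_L_append (u v : List Char) :
    pvL (u ++ v) = (pvL u).flatMap (fun a => (pvL v).map (fun t => a ++ t)) := by
  show (u ++ v).foldl _ [""] = _
  rw [List.foldl_append]
  exact pv_L_shift v (pvL u)

-- B's fold of cross-products over the chosen variant lists is the canonical list of the join
theorem pv_prodfold (combo : List String) : ∀ vs : List String,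
    (combo.map (fun d => leet_alt d.toList)).foldl
        (fun vs vl => vs.flatMap (fun a => vl.map (fun b => a ++ b))) vs
      = vs.flatMap (fun a => (pvL (PySem.Str.join "" combo).toList).map (fun t => a ++ t)) := by
  induction combo with
  | nil =>
    intro vs
    simp only [List.map_nil, List.foldl_nil, pv_join0_nil]
    simp [pvL, List.flatMap, pv_flatten_singl]
  | cons d combo ih =>
    intro vs
    simp only [List.map_cons, List.foldl_cons]
    rw [ih]
    have hjoin : (PySem.Str.join "" (d :: combo)).toList
        = d.toList ++ (PySem.Str.join "" combo).toList := by
      rw [pv_join0_cons, String.toList_append]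
    rw [hjoin, pv_L_append, pv_leetB_L]
    simp [List.flatMap_assoc, List.flatMap_map, List.map_flatMap, List.map_map, Function.comp_def, String.append_assoc]

-- the first variant is the word itself
theorem pv_leetB_head (cs : List Char) : ∃ rest, leet_alt cs = String.ofList cs :: rest := by
  induction cs with
  | nil => exact ⟨[], rfl⟩
  | cons c cs ih =>
    obtain ⟨rest, hrest⟩ := ih
    have hh : String.ofList [c] ++ String.ofList cs = String.ofList (c :: cs) := by
      apply String.toList_inj.mp; simp
    simp only [leet_alt, optsOf, List.flatMap_cons, hrest, List.map_cons, List.cons_append, hh]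
    exact ⟨_, rfl⟩

theorem pv_leet_head (b : String) : ∃ rest, pvL b.toList = b :: rest := by
  obtain ⟨rest, hrest⟩ := pv_leetB_head b.toList
  rw [pv_leetB_L] at hrest
  exact ⟨rest, by rw [hrest, String.ofList_toList]⟩

-- the per-combo bodies agree: A's extra base add is absorbed by the first variation
theorem pv_combo_eq (s : PySem.Set String) (b : String) :
    (generate_leet_variations b).foldl (fun wl lw => PySem.Set.add wl lw) (PySem.Set.add s b)
      = PySem.Set.update s (pvL b.toList) := by
  rw [pv_leetA_L]
  obtain ⟨rest, hb⟩ := pv_leet_head b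
  rw [hb]
  show ((b :: rest).foldl PySem.Set.add (PySem.Set.add s b)) = (b :: rest).foldl PySem.Set.add s
  simp only [List.foldl_cons]
  have hmem : b ∈ PySem.Set.add s b := by
    rw [PySem.Set.add_eq_ite]
    split_ifs with hc
    · exact hc
    · simp
  rw [PySem.Set.add_of_mem hmem]

-- B's recursive arrangement generator is itertools.permutations
theorem pv_arr_perm {α : Type} (r : Nat) : ∀ (pool : List α),
    arrangements pool r = PySem.List.permutations pool r := by
  induction r with
  | zero => intro pool; simp [arrangements, PySem.List.permutations]
  | succ r ih =>
    intro pool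
    simp only [arrangements, PySem.List.permutations]
    refine List.flatMap_congr fun i _ => ?_
    cases pool[i]? with
    | none => rfl
    | some x => simp [ih]

-- permutations commute with map
theorem pv_perm_map {α β : Type} (f : α → β) (r : Nat) : ∀ (l : List α),
    PySem.List.permutations (l.map f) r = (PySem.List.permutations l r).map (List.map f) := by
  induction r with
  | zero => intro l; simp [PySem.List.permutations]
  | succ r ih =>
    intro l
    simp only [PySem.List.permutations, List.length_map, List.map_flatMap]
    refine List.flatMap_congr fun i _ => ?_
    rw [List.getElem?_map]
    cases h : l[i]? with
    | none => rfl
    | some x =>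
      simp only [Option.map_some]
      rw [List.eraseIdx_map, ih]
      simp [List.map_map, Function.comp_def]

-- the base word-set folds agree
theorem pv_words_eq (details : List String) :
    (PySem.List.pyRange 1 ((details.length : Int) + 1) 1).foldl
      (fun wl r =>
        (PySem.List.permutations details r.toNat).foldl
          (fun wl combo =>
            (generate_leet_variations (PySem.Str.join "" combo)).foldl
              (fun wl lw => PySem.Set.add wl lw)
              (PySem.Set.add wl (PySem.Str.join "" combo)))
          wl)
      PySem.Set.empty
    = (PySem.List.pyRange 1 ((details.length : Int) + 1) 1).foldl
      (fun ws r =>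
        (arrangements (details.map (fun d => leet_alt d.toList)) r.toNat).foldl
          (fun ws chosen =>
            PySem.Set.update ws
              (chosen.foldl (fun vs vl => vs.flatMap (fun a => vl.map (fun b => a ++ b))) [""]))
          ws)
      PySem.Set.empty := by
  apply PySem.List.foldl_congr_mem
  intro wl r _
  rw [pv_arr_perm, pv_perm_map, List.foldl_map]
  apply PySem.List.foldl_congr_mem
  intro s combo _
  rw [pv_combo_eq, pv_prodfold]
  congr 1
  simp [String.empty_append, List.flatMap]

-- folding Set.add over a flatMap is the nested enhancement loop
theorem pv_ofList_flatMap (l : List String) (g : String → List String) :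
    ∀ s : PySem.Set String,
      (l.flatMap g).foldl PySem.Set.add s = l.foldl (fun s w => (g w).foldl PySem.Set.add s) s := by
  induction l with
  | nil => intro s; rfl
  | cons w t ih => intro s; simp only [List.flatMap_cons, List.foldl_append, List.foldl_cons, ih]

theorem pv_enhanced_eq (wl : List String) :
    wl.foldl
      (fun ew w =>
        PySem.Set.add
          (COMMON_PREFIXES.foldl (fun ew pre => PySem.Set.add ew (pre ++ w))
            (COMMON_SUFFIXES.foldl (fun ew suf => PySem.Set.add ew (w ++ suf)) ew))
          (pyCapitalize w))
      PySem.Set.empty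
    = PySem.Set.ofList (wl.flatMap (fun w =>
        COMMON_SUFFIXES.map (fun suf => w ++ suf)
        ++ COMMON_PREFIXES.map (fun pre => pre ++ w)
        ++ [pyCapitalize w])) := by
  rw [PySem.Set.ofList_eq_foldl, pv_ofList_flatMap]
  apply PySem.List.foldl_congr_mem
  intro ew w _
  simp [List.foldl_append, List.foldl_map]

-- ===== VERDICT (by name: the statement is the Claim_ definition above) =====
theorem generate_wordlist_spec : Claim_equal_generate_wordlist := by
  intro details _
  show generate_wordlist details = generate_wordlist_alt details
  simp only [generate_wordlist, generate_wordlist_alt]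
  rw [pv_words_eq details, pv_enhanced_eq]
  rfl
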